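-- pv_equiv track=rewrite | github.com/pypi-data/pypi-mirror-397 | packages/dbrepo/dbrepo-1.13.2-py3-none-any.whl/dbrepo/core/client/search.py | key_to_attr_name
-- ===== SOURCE A (Python) =====
-- def key_to_attr_name(key: str) -> str:
--     """
--     Maps an attribute key to a machine-readable representation
--     :param key: The attribute key
--     :return: The machine-readable representation of the attribute key
--     """
--     parts = []
--     previous = None
--     for part in key.split(".")[1:-1]:  # remove the first and last sub-item database.xxx.yyy.zzz.type -> xxx.yyy.zzz
--         if part == "mappings" or part == "mapping":  # remove the mapping sub-item(s)
--             continue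
--         if part == previous:  # remove redundant sub-item(s)
--             continue
--         previous = part
--         parts.append(part)
--     return ".".join(parts)
-- ===== SOURCE B (Python) =====
-- def key_to_attr_name(key: str) -> str:
--     """
--     Maps an attribute key to a machine-readable representation
--     :param key: The attribute key
--     :return: The machine-readable representation of the attribute key
--     """
--     rest = [p for p in key.split(".")[1:-1] if p not in ("mappings", "mapping")]
--     reps = []  # one representative per maximal run of equal segments
--     while rest:
--         head = rest[0]
--         reps.append(head)
--         while rest and rest[0] == head:  # skip the whole run
--             rest = rest[1:]
--     return ".".join(reps)
-- ===== Notes on version B (the rewrite author's own statement) =====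
-- stated objective: alternative
-- what changed: Replaced the single stateful loop that tracks the last kept segment by a filter comprehension followed by a run-skipping pass: an outer loop that records one representative per maximal run of equal segments and an inner loop that slices away the rest of the run, with no last-kept-element state.
import Mathlib
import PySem

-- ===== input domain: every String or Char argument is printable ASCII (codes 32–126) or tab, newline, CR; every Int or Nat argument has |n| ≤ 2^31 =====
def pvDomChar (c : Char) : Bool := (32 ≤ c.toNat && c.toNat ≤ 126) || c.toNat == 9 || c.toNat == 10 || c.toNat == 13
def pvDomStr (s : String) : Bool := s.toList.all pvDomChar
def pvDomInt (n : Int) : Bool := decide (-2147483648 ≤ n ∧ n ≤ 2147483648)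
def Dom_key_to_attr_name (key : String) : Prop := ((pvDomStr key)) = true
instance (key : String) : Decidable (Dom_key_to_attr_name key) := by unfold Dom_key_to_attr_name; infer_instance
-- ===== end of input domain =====

-- B replaces A's single stateful last-kept-segment loop by a filter pass followed by a
-- run-skipping pass (one representative per maximal run of equal segments); objective: alternative.

-- ===== PORT A =====
def key_to_attr_name (key : String) : String :=
  let segs := PySem.List.slice ((PySem.Str.split? key ".").getD []) (some 1) (some (-1))
  let st := segs.foldl (fun (s : List String × Option String) part =>
      if part = "mappings" ∨ part = "mapping" then s
      else if some part = s.2 then s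
      else (s.1 ++ [part], some part)) ([], none)
  PySem.Str.join "." st.1

-- ===== PORT B =====
-- inner while loop of B: 'while rest and rest[0] == head: rest = rest[1:]'
def pvSkipRun (head : String) : List String → List String
  | [] => []
  | y :: ys => if y == head then pvSkipRun head ys else y :: ys

theorem pvSkipRun_len (head : String) (xs : List String) :
    (pvSkipRun head xs).length ≤ xs.length := by
  induction xs with
  | nil => simp [pvSkipRun]
  | cons y ys ih =>
    simp only [pvSkipRun]
    split
    · exact Nat.le_succ_of_le ih
    · simp

-- outer while loop of B: take the head as representative, skip its run
def pvRuns : List String → List String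
  | [] => []
  | x :: xs => x :: pvRuns (pvSkipRun x xs)
termination_by xs => xs.length
decreasing_by simpa using Nat.lt_succ_of_le (pvSkipRun_len x xs)

def key_to_attr_name_alt (key : String) : String :=
  let rest := (PySem.List.slice ((PySem.Str.split? key ".").getD []) (some 1) (some (-1))).filter
      (fun p => !(p == "mappings" || p == "mapping"))
  PySem.Str.join "." (pvRuns rest)

-- ===== PRECONDITION & SPEC =====
def Spec_key_to_attr_name (key : String) (out : String) : Prop := out = key_to_attr_name_alt key
instance (key : String) (out : String) : Decidable (Spec_key_to_attr_name key out) := by unfold Spec_key_to_attr_name; infer_instance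

-- ===== CLAIM (what is proved, stated in full; the proofs are below) =====
def Claim_equal_key_to_attr_name : Prop := ∀ (key : String), Dom_key_to_attr_name key → Spec_key_to_attr_name key (key_to_attr_name key)

-- ===== LEMMAS AND PROOFS =====

-- collapse of consecutive duplicates, with the previous kept element as state
def pvDedup : Option String → List String → List String
  | _, [] => []
  | p, x :: xs => if some x = p then pvDedup p xs else x :: pvDedup (some x) xs

theorem pvFoldA (l : List String) (acc : List String) (p : Option String) :
    (l.foldl (fun (s : List String × Option String) part =>
        if part = "mappings" ∨ part = "mapping" then s
        else if some part = s.2 then s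
        else (s.1 ++ [part], some part)) (acc, p)).1
      = acc ++ pvDedup p (l.filter (fun q => !(q == "mappings" || q == "mapping"))) := by
  induction l generalizing acc p with
  | nil => simp [pvDedup]
  | cons x xs ih =>
    by_cases hm : x = "mappings" ∨ x = "mapping"
    · have hb : (!(x == "mappings" || x == "mapping")) = false := by
        rcases hm with h | h <;> simp [h]
      rw [List.filter_cons, hb]
      simp only [List.foldl_cons, if_pos hm]
      exact ih acc p
    · have hb : (!(x == "mappings" || x == "mapping")) = true := by
        rcases not_or.mp hm with ⟨h1, h2⟩
        simp [h1, h2]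
      rw [List.filter_cons, hb]
      by_cases hp : some x = p
      · simp only [List.foldl_cons, if_neg hm, if_pos hp, ih, if_true]
        rw [pvDedup, if_pos hp]
      · simp only [List.foldl_cons, if_neg hm, if_neg hp, ih, if_true]
        rw [pvDedup, if_neg hp]
        simp

-- skipping the run of x then deduping with no state = deduping with state x
theorem pvDedup_skip (x : String) (xs : List String) :
    pvDedup (none) (pvSkipRun x xs) = pvDedup (some x) xs := by
  induction xs with
  | nil => simp [pvSkipRun, pvDedup]
  | cons y ys ih =>
    by_cases h : y = x
    · subst h
      simp only [pvSkipRun, BEq.rfl, if_true, ih]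
      rw [pvDedup, if_pos rfl]
    · have hb : (y == x) = false := by simp [h]
      simp only [pvSkipRun, hb]
      simp [pvDedup, h]

theorem pvRunsB (xs : List String) : pvRuns xs = pvDedup none xs := by
  induction xs using pvRuns.induct with
  | case1 => simp [pvRuns, pvDedup]
  | case2 x xs ih =>
    rw [pvRuns, ih, pvDedup_skip, pvDedup]
    simp

-- ===== VERDICT (by name: the statement is the Claim_ definition above) =====
theorem key_to_attr_name_spec : Claim_equal_key_to_attr_name := by
  intro key _
  unfold Spec_key_to_attr_name key_to_attr_name key_to_attr_name_alt
  simp only [pvFoldA, pvRunsB, List.nil_append]
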